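-- pv_equiv track=rewrite | github.com/khanhlinh170806-cpu/dsa | built-in/sliding_window.py | max_sum_fixed
-- ===== SOURCE A (Python) =====
-- def max_sum_fixed(arr, k):
--     n = len(arr)
--     if k <= 0 or n < k:
--         return -1
--
--     # initial window (built-in)
--     window_sum = sum(arr[:k])
--     max_sum = window_sum
--
--     # sliding
--     for i in range(n - k):
--         window_sum += arr[i + k] - arr[i]
--         max_sum = max(max_sum, window_sum)
--
--     return max_sum
-- ===== SOURCE B (Python) =====
-- def max_sum_fixed(arr, k):
--     n = len(arr)
--     if k <= 0 or n < k:
--         return -1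
--     prefix = [0]
--     s = 0
--     for x in arr:
--         s += x
--         prefix.append(s)
--     diffs = [q - p for p, q in zip(prefix, prefix[k:])]
--     best = diffs[0]
--     for d in diffs[1:]:
--         best = max(best, d)
--     return best
-- ===== Notes on version B (the rewrite author's own statement) =====
-- stated objective: alternative
-- what changed: Replaces the incremental sliding-window running sum with a prefix-sum array: each window sum is read off as a difference of two prefix sums (via zip of the prefix list with its k-shift) and the maximum is taken over that list.
import Mathlib
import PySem

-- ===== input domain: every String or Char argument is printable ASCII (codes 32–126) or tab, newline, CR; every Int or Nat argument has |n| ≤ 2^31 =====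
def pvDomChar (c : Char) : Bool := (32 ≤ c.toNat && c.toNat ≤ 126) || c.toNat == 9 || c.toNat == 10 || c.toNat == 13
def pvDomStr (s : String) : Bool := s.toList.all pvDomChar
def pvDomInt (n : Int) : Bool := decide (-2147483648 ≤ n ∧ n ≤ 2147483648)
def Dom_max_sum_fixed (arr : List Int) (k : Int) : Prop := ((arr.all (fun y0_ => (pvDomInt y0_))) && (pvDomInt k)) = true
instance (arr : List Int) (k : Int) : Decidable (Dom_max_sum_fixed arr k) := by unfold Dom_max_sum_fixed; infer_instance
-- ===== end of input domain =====

-- B replaces A's incremental sliding window sum by a prefix-sum array and takes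
-- the maximum over the list of prefix differences; same O(n) cost, different decomposition.

-- ===== PORT A =====
def max_sum_fixed (arr : List Int) (k : Int) : Int :=
  let n : Int := arr.length
  if k ≤ 0 ∨ n < k then -1
  else
    let window_sum := (PySem.List.slice arr none (some k)).sum
    let r := (PySem.List.pyRange 0 (n - k) 1).foldl
      (fun (p : Int × Int) i =>
        let w := p.1 + PySem.List.pyGetD arr (i + k) 0 - PySem.List.pyGetD arr i 0
        (w, max p.2 w)) (window_sum, window_sum)
    r.2

-- ===== PORT B =====
def max_sum_fixed_alt (arr : List Int) (k : Int) : Int :=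
  let n : Int := arr.length
  if k ≤ 0 ∨ n < k then -1
  else
    let pre := (arr.foldl (fun (st : List Int × Int) x => (st.1 ++ [st.2 + x], st.2 + x)) ([0], 0)).1
    let diffs := List.zipWith (fun p q => q - p) pre (PySem.List.slice pre (some k) none)
    -- diffs[0] (always in range here: diffs has length n - k + 1 ≥ 1)
    let best := diffs.headD (-1)
    (PySem.List.slice diffs (some 1) none).foldl max best

-- ===== PRECONDITION & SPEC =====
def Spec_max_sum_fixed (arr : List Int) (k : Int) (out : Int) : Prop := out = max_sum_fixed_alt arr k
instance (arr : List Int) (k : Int) (out : Int) : Decidable (Spec_max_sum_fixed arr k out) := by unfold Spec_max_sum_fixed; infer_instance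

-- ===== CLAIM (what is proved, stated in full; the proofs are below) =====
def Claim_equal_max_sum_fixed : Prop := ∀ (arr : List Int) (k : Int), Dom_max_sum_fixed arr k → Spec_max_sum_fixed arr k (max_sum_fixed arr k)

-- ===== LEMMAS AND PROOFS =====

/-- prefix sum of the first `j` elements -/
def pvP (arr : List Int) (j : Nat) : Int := (arr.take j).sum

theorem pvP_succ (arr : List Int) (m : Nat) :
    pvP arr (m + 1) = pvP arr m + arr.getD m 0 := by
  induction arr generalizing m with
  | nil => simp [pvP]
  | cons x xs ih =>
    cases m with
    | zero => simp [pvP]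
    | succ m =>
      simp only [pvP, List.take_succ_cons, List.sum_cons]
      have h := ih m
      simp only [pvP] at h
      rw [h]
      simp [List.getD]
      ring

/-- A's sliding loop: invariant for the running window sum and running max. -/
theorem pvLoopA (g1 g2 W : Nat → Int)
    (hW : ∀ j, W (j + 1) = W j + g1 j - g2 j) (m : Nat) (ms : Int) :
    List.foldl (fun (p : Int × Int) j =>
        (p.1 + g1 j - g2 j, max p.2 (p.1 + g1 j - g2 j))) (W 0, ms) (List.range m)
      = (W m, List.foldl max ms ((List.range m).map fun j => W (j + 1))) := by
  induction m with
  | zero => simp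
  | succ m ih =>
    rw [List.range_succ, List.foldl_append, ih, List.map_append, List.foldl_append]
    simp [hW m]

/-- B's prefix-building loop. -/
theorem pvPrefixBuild (arr : List Int) : ∀ (acc : List Int) (s : Int),
    arr.foldl (fun (st : List Int × Int) x => (st.1 ++ [st.2 + x], st.2 + x)) (acc, s)
      = (acc ++ (List.range arr.length).map (fun j => s + (arr.take (j + 1)).sum),
         s + arr.sum) := by
  induction arr with
  | nil => simp
  | cons x xs ih =>
    intro acc s
    simp only [List.foldl_cons, ih, List.length_cons, List.sum_cons, Prod.mk.injEq]
    constructor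
    · rw [List.range_succ_eq_map, List.map_cons, List.map_map, List.append_assoc]
      simp only [List.take_succ_cons, List.sum_cons, List.singleton_append]
      have hh : s + x = s + (x + (List.take 0 xs).sum) := by simp
      have ht : List.map ((fun j => s + (x + (List.take j xs).sum)) ∘ Nat.succ) (List.range xs.length)
          = List.map (fun j => s + x + (List.take (j + 1) xs).sum) (List.range xs.length) := by
        apply List.map_congr_left
        intro j _
        simp [Function.comp]
        ring
      rw [ht, ← hh]
    · ring

theorem max_sum_fixed_eq (arr : List Int) (k : Int) :
    max_sum_fixed arr k = max_sum_fixed_alt arr k := by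
  unfold max_sum_fixed max_sum_fixed_alt
  by_cases h : k ≤ 0 ∨ (arr.length : Int) < k
  · simp [h]
  · simp only [h, if_false]
    push_neg at h
    obtain ⟨hk0, hkn⟩ := h
    set n := arr.length with hn
    set k' := k.toNat with hk'
    have hkk : (k' : Int) = k := Int.toNat_of_nonneg (le_of_lt hk0)
    have hk'n : k' ≤ n := by omega
    have hws : (PySem.List.slice arr none (some k)).sum = pvP arr k' := by
      rw [PySem.List.slice_to arr (le_of_lt hk0)]; rfl
    have hrange : PySem.List.pyRange 0 (↑n - k) 1
        = (List.range (n - k')).map (Nat.cast : Nat → Int) := by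
      rw [PySem.List.pyRange_one]
      rw [show ((n : Int) - k - 0).toNat = n - k' from by omega]
      apply List.map_congr_left
      intro j _
      simp
    set W : Nat → Int := fun j => pvP arr (j + k') - pvP arr j with hWdef
    have hW : ∀ j, W (j + 1) = W j + arr.getD (j + k') 0 - arr.getD j 0 := by
      intro j
      simp only [hWdef]
      rw [show j + 1 + k' = (j + k') + 1 from by omega, pvP_succ, pvP_succ]
      ring
    have hA : (List.foldl
        (fun (p : Int × Int) i =>
          (p.1 + PySem.List.pyGetD arr (i + k) 0 - PySem.List.pyGetD arr i 0,
           max p.2 (p.1 + PySem.List.pyGetD arr (i + k) 0 - PySem.List.pyGetD arr i 0)))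
        (pvP arr k', pvP arr k') (PySem.List.pyRange 0 (↑n - k) 1)).2
        = List.foldl max (W 0) ((List.range (n - k')).map fun j => W (j + 1)) := by
      rw [hrange, List.foldl_map]
      have hbody : (fun (p : Int × Int) (j : Nat) =>
          (p.1 + PySem.List.pyGetD arr ((j : Int) + k) 0 - PySem.List.pyGetD arr (j : Int) 0,
           max p.2 (p.1 + PySem.List.pyGetD arr ((j : Int) + k) 0 - PySem.List.pyGetD arr (j : Int) 0)))
          = (fun (p : Int × Int) (j : Nat) =>
          (p.1 + arr.getD (j + k') 0 - arr.getD j 0,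
           max p.2 (p.1 + arr.getD (j + k') 0 - arr.getD j 0))) := by
        funext p j
        rw [show (j : Int) + k = ((j + k' : Nat) : Int) from by push_cast; omega,
            PySem.List.pyGetD_natCast, PySem.List.pyGetD_natCast]
      rw [hbody]
      rw [show pvP arr k' = W 0 from by simp [hWdef, pvP]]
      rw [pvLoopA _ _ W hW (n - k') (W 0)]
    have hpre : (arr.foldl (fun (st : List Int × Int) x => (st.1 ++ [st.2 + x], st.2 + x))
        ([0], 0)).1 = (List.range (n + 1)).map (pvP arr) := by
      rw [pvPrefixBuild arr [0] 0]
      rw [List.range_succ_eq_map, List.map_cons, List.map_map]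
      simp only [List.singleton_append, List.cons.injEq]
      refine ⟨by simp [pvP], ?_⟩
      apply List.map_congr_left
      intro j _
      simp [pvP, Function.comp, Nat.succ_eq_add_one]
    have hdrop : PySem.List.slice ((List.range (n + 1)).map (pvP arr)) (some k) none
        = (List.range (n + 1 - k')).map (fun j => pvP arr (j + k')) := by
      rw [PySem.List.slice_from _ (le_of_lt hk0), ← hk', ← List.map_drop]
      rw [show List.range (n + 1) = List.range k' ++ (List.range (n + 1 - k')).map (k' + ·)
            from by rw [← List.range_add]; congr 1; omega]
      rw [show ((List.range k' ++ (List.range (n + 1 - k')).map (k' + ·)).drop k'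
            = (List.range (n + 1 - k')).map (k' + ·))
            from by simpa using List.drop_left (List.range k') _, List.map_map]
      apply List.map_congr_left
      intro j _
      simp [Function.comp, Nat.add_comm]
    have hdiffs : List.zipWith (fun p q => q - p) ((List.range (n + 1)).map (pvP arr))
        ((List.range (n + 1 - k')).map (fun j => pvP arr (j + k')))
        = (List.range (n + 1 - k')).map (fun j => pvP arr (j + k') - pvP arr j) := by
      apply List.ext_getElem
      · simp only [List.length_zipWith, List.length_map, List.length_range]
        omega
      · intro i h1 h2
        have hi : i < n + 1 - k' := by simpa using h2
        have hi' : i < n + 1 := by omega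
        simp [List.getElem_zipWith]
    rw [hws, hA, hpre, hdrop, hdiffs,
        show n + 1 - k' = (n - k') + 1 from by omega,
        List.range_succ_eq_map, List.map_cons, List.map_map,
        List.headD_cons, PySem.List.slice_from_one, List.tail_cons]
    have h1 : W 0 = pvP arr (0 + k') - pvP arr 0 := rfl
    have h2 : (List.range (n - k')).map (fun j => W (j + 1))
        = (List.range (n - k')).map ((fun j => pvP arr (j + k') - pvP arr j) ∘ Nat.succ) := by
      apply List.map_congr_left
      intro j _
      simp [hWdef, Function.comp, Nat.succ_eq_add_one]
    rw [← h1, ← h2]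

-- ===== VERDICT (by name: the statement is the Claim_ definition above) =====
theorem max_sum_fixed_spec : Claim_equal_max_sum_fixed := by
  intro arr k _
  unfold Spec_max_sum_fixed
  exact max_sum_fixed_eq arr k
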